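-- pv_equiv track=rewrite | github.com/Glottotopia/aoc | 02/02.py | evaluate_changes
-- ===== SOURCE A (Python) =====
-- import math
--
-- def evaluate_changes(changes):
--     signs = {math.copysign(1, x) for x in changes}
--     if len(signs) != 1:  # there is either no sign, or both + and -
--         return False
--     if 0 in changes:
--         return False
--     if max(changes) > 3:
--         return False
--     if min(changes) < -3:
--         return False
--     return True
-- ===== SOURCE B (Python) =====
-- def evaluate_changes(changes):
--     if not changes:
--         return False
--     return all(0 < x <= 3 for x in changes) or all(-3 <= x < 0 for x in changes)
-- ===== Notes on version B (the rewrite author's own statement) =====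
-- stated objective: simpler
-- what changed: Replaces the set-of-signs comprehension plus separate membership/max/min passes with a single guarded predicate: empty list is False, otherwise one short-circuiting all() scan checking every element lies in (0,3] or one checking every element lies in [-3,0).
import Mathlib
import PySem

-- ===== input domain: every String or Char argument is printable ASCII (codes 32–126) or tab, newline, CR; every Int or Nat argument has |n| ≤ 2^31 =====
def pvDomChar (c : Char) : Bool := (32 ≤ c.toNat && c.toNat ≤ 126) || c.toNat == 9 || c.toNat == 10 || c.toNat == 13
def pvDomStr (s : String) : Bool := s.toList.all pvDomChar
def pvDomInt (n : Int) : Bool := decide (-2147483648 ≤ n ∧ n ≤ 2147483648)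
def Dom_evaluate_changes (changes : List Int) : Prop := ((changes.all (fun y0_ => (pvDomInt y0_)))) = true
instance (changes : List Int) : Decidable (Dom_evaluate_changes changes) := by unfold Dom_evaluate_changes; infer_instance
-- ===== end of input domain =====

-- B replaces A's set-of-signs + membership + max/min passes with one guarded all()-predicate per sign branch (simpler decomposition, same O(n) cost).

-- ===== PORT A =====
-- math.copysign(1, x) on an int x: -1 for x < 0, else 1 (copysign(1, 0) = 1.0)
def pySignA (x : Int) : Int := if x < 0 then -1 else 1

def evaluate_changes (changes : List Int) : Bool :=
  let signs : PySem.Set Int := PySem.Set.ofList (changes.map pySignA)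
  if PySem.Set.len signs ≠ 1 then false
  else if changes.contains (0 : Int) then false
  else
    -- max([]) / min([]) would raise, but len(signs) = 1 forces changes ≠ [], so the none arms are unreachable
    match PySem.List.max? changes (fun y => y) with
    | none => false
    | some mx =>
      if mx > 3 then false
      else
        match PySem.List.min? changes (fun y => y) with
        | none => false
        | some mn => if mn < -3 then false else true

-- ===== PORT B =====
def evaluate_changes_alt (changes : List Int) : Bool :=
  match changes with
  | [] => false
  | _ => changes.all (fun x => decide (0 < x) && decide (x ≤ 3))
         || changes.all (fun x => decide (-3 ≤ x) && decide (x < 0))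

-- ===== PRECONDITION & SPEC =====
def Spec_evaluate_changes (changes : List Int) (out : Bool) : Prop := out = evaluate_changes_alt changes
instance (changes : List Int) (out : Bool) : Decidable (Spec_evaluate_changes changes out) := by unfold Spec_evaluate_changes; infer_instance

-- ===== CLAIM (what is proved, stated in full; the proofs are below) =====
def Claim_equal_evaluate_changes : Prop := ∀ (changes : List Int), Dom_evaluate_changes changes → Spec_evaluate_changes changes (evaluate_changes changes)

-- ===== LEMMAS AND PROOFS =====

-- a nonempty list's sign set has one element iff every element has the head's sign
theorem ofList_len_one {α : Type} [BEq α] [LawfulBEq α] (a : α) (l : List α) :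
    (PySem.Set.ofList (a :: l)).length = 1 ↔ ∀ x ∈ a :: l, x = a := by
  constructor
  · intro h x hx
    have hxm : x ∈ PySem.Set.ofList (a :: l) := (PySem.Set.mem_ofList _ _).2 hx
    have ham : a ∈ PySem.Set.ofList (a :: l) := (PySem.Set.mem_ofList _ _).2 (List.mem_cons_self)
    match hS : PySem.Set.ofList (a :: l), h with
    | [b], _ =>
      rw [hS] at hxm ham
      simp only [List.mem_singleton] at hxm ham
      rw [hxm, ham]
  · intro h
    have ham : a ∈ PySem.Set.ofList (a :: l) := (PySem.Set.mem_ofList _ _).2 (List.mem_cons_self)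
    have hall : ∀ x ∈ PySem.Set.ofList (a :: l), x = a := by
      intro x hx
      exact h x ((PySem.Set.mem_ofList _ _).1 hx)
    have hnd : (PySem.Set.ofList (a :: l)).Nodup := PySem.Set.nodup_ofList _
    match hS : PySem.Set.ofList (a :: l) with
    | [] => rw [hS] at ham; cases ham
    | [b] => rfl
    | b :: c :: r =>
      rw [hS] at hall hnd
      have hb := hall b (by simp)
      have hc := hall c (by simp)
      have : b ≠ c := by
        have := List.nodup_cons.1 hnd
        intro hbc; exact this.1 (hbc ▸ List.mem_cons_self)
      exact absurd (hb.trans hc.symm) this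

theorem evaluate_changes_cons (a : Int) (t : List Int) :
    evaluate_changes (a :: t) = evaluate_changes_alt (a :: t) := by
  have hmax := PySem.List.max?_id_cons (x := a) (t := t)
  have hmin := PySem.List.min?_id_cons (x := a) (t := t)
  rw [Bool.eq_iff_iff]
  have hsign : ((PySem.Set.ofList ((a :: t).map pySignA)).length = 1) ↔
      ∀ x ∈ (a :: t), pySignA x = pySignA a := by
    rw [List.map_cons, ofList_len_one]
    constructor
    · intro h x hx
      rcases List.mem_cons.1 hx with rfl | hx
      · rfl
      · exact h _ (by simp only [List.mem_cons, List.mem_map]; right; exact ⟨x, hx, rfl⟩)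
    · intro h y hy
      simp only [List.mem_cons, List.mem_map] at hy
      rcases hy with hy | ⟨x, hx, rfl⟩
      · exact hy
      · exact h x (List.mem_cons_of_mem _ hx)
  have hA : evaluate_changes (a :: t) = true ↔
      ((∀ x ∈ (a :: t), pySignA x = pySignA a) ∧ (0 : Int) ∉ (a :: t) ∧
        t.foldl max a ≤ 3 ∧ -3 ≤ t.foldl min a) := by
    unfold evaluate_changes
    simp only [PySem.Set.len, hmax, hmin]
    split_ifs with h1 h2 <;>
      simp_all
  have hB : evaluate_changes_alt (a :: t) = true ↔
      ((∀ x ∈ (a :: t), 0 < x ∧ x ≤ 3) ∨ (∀ x ∈ (a :: t), -3 ≤ x ∧ x < 0)) := by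
    unfold evaluate_changes_alt
    simp [List.all_eq_true]
  rw [hA, hB]
  have hfmx := PySem.List.le_foldl_max t a
  have hfmn := PySem.List.foldl_min_le t a
  have hfmxm : t.foldl max a ∈ (a :: t) := by
    rcases PySem.List.foldl_max_mem t a with h | h
    · rw [h]; exact List.mem_cons_self
    · exact List.mem_cons_of_mem _ h
  have hfmnm : t.foldl min a ∈ (a :: t) := by
    rcases PySem.List.foldl_min_mem t a with h | h
    · rw [h]; exact List.mem_cons_self
    · exact List.mem_cons_of_mem _ h
  constructor
  · rintro ⟨hs, h0, hmx3, hmn3⟩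
    have ha0 : a ≠ 0 := fun h => h0 (h ▸ List.mem_cons_self)
    rcases lt_or_gt_of_ne ha0 with hneg | hpos
    · right
      intro x hx
      have := hs x hx
      unfold pySignA at this
      have hxneg : x < 0 := by
        by_contra hge
        simp only [if_neg (not_lt.2 (not_lt.1 hge)), if_pos hneg] at this
        omega
      refine ⟨?_, hxneg⟩
      have h1 : t.foldl min a ≤ x := by
        rcases List.mem_cons.1 hx with rfl | hx
        · exact hfmn.1
        · exact hfmn.2 _ hx
      omega
    · left
      intro x hx
      have := hs x hx
      unfold pySignA at this
      have hxpos : 0 < x := by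
        by_contra hle
        rw [not_lt] at hle
        rcases lt_or_eq_of_le hle with hlt | heq
        · simp only [if_pos hlt, if_neg (not_lt.2 (le_of_lt hpos))] at this
          omega
        · exact h0 (heq ▸ hx)
      refine ⟨hxpos, ?_⟩
      have h1 : x ≤ t.foldl max a := by
        rcases List.mem_cons.1 hx with rfl | hx
        · exact hfmx.1
        · exact hfmx.2 _ hx
      omega
  · rintro (h | h)
    · have hsgn : ∀ x ∈ (a :: t), pySignA x = pySignA a := by
        intro x hx
        have hx' := h x hx
        have ha' := h a List.mem_cons_self
        unfold pySignA
        rw [if_neg (by omega), if_neg (by omega)]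
      have h0 : (0 : Int) ∉ (a :: t) := fun h0 => by have := h 0 h0; omega
      have hmxv := h _ hfmxm
      have hmnv := h _ hfmnm
      exact ⟨hsgn, h0, by omega, by omega⟩
    · have hsgn : ∀ x ∈ (a :: t), pySignA x = pySignA a := by
        intro x hx
        have hx' := h x hx
        have ha' := h a List.mem_cons_self
        unfold pySignA
        rw [if_pos (by omega), if_pos (by omega)]
      have h0 : (0 : Int) ∉ (a :: t) := fun h0 => by have := h 0 h0; omega
      have hmxv := h _ hfmxm
      have hmnv := h _ hfmnm
      exact ⟨hsgn, h0, by omega, by omega⟩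

-- ===== VERDICT (by name: the statement is the Claim_ definition above) =====
theorem evaluate_changes_spec : Claim_equal_evaluate_changes := by
  intro changes _
  unfold Spec_evaluate_changes
  cases changes with
  | nil => decide
  | cons a t => exact evaluate_changes_cons a t
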